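-- pv_equiv track=rewrite | github.com/AnnaBogddan/FSE | Lab_5/A4.py | search_operation
-- ===== SOURCE A (Python) =====
-- def decode_rle_sequence(sequence):
--     result = []
--     i = 0
--     while i < len(sequence):
--         if sequence[i].isdigit():
--             num_str = ""
--             while i < len(sequence) and sequence[i].isdigit():
--                 num_str += sequence[i]
--                 i += 1
--             if i < len(sequence):
--                 count = int(num_str)
--                 amino_acid = sequence[i]
--                 result.append(amino_acid * count)
--                 i += 1
--         else:
--             result.append(sequence[i])
--             i += 1
--     return "".join(result)
--
-- def search_operation(proteins, search_sequence, operation_num):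
--     results = []
--     for name, organism, sequence in proteins:
--         decoded_sequence = decode_rle_sequence(sequence)
--         if search_sequence in decoded_sequence:
--             results.append((organism, name))
--
--     output_lines = [f"{operation_num:03d} search {search_sequence}"]
--     output_lines.append("organism protein")
--
--     if results:
--         for organism, name in results:
--             output_lines.append(f"{organism} {name}")
--     else:
--         output_lines.append("NOT FOUND")
--
--     return output_lines
-- ===== SOURCE B (Python) =====
-- def search_operation(proteins, search_sequence, operation_num):
--     SEP = "\x00"  # never occurs in the (printable-ASCII) sequences
--
--     def decode(seq):
--         # stage 1: mark the end of every (digits+char) token, then split into tokens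
--         marked = "".join(c if c.isdigit() else c + SEP for c in seq)
--         tokens = marked.split(SEP)[:-1]  # the dropped tail is a trailing digit run (or empty)
--         # stage 2: expand each token
--         return "".join(t[-1] * int(t[:-1]) if len(t) > 1 else t for t in tokens)
--
--     matches = [f"{organism} {name}" for name, organism, seq in proteins
--                if search_sequence in decode(seq)]
--     return [f"{operation_num:03d} search {search_sequence}",
--             "organism protein"] + (matches or ["NOT FOUND"])
-- ===== Notes on version B (the rewrite author's own statement) =====
-- stated objective: alternative
-- what changed: A decodes each RLE string with an index-walking loop containing a nested digit-collecting while; B instead runs a staged mark/split/expand pipeline: it inserts a NUL marker after every non-digit character, splits the marked string on NUL into digits+char tokens (dropping the trailing digit run), expands each token with char*int(count), and replaces A's accumulator loop plus branchy formatting by a comprehension with a 'matches or [NOT FOUND]' tail.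
import Mathlib
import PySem

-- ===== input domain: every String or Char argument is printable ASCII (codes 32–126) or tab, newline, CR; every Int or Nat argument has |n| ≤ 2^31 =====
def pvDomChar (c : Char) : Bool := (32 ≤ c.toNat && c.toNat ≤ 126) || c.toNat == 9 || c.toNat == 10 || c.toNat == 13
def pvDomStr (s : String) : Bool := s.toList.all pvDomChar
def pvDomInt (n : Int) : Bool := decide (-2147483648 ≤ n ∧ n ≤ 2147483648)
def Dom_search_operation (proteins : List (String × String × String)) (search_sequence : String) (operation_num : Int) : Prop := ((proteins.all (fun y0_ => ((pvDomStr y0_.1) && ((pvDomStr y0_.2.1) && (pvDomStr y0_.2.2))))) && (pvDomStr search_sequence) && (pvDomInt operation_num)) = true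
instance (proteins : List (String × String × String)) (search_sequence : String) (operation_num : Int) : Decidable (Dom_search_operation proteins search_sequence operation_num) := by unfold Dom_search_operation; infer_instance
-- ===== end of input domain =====

-- B replaces A's index-walking RLE decoder by a staged mark/split/expand pipeline (insert a
-- NUL marker after each non-digit char, split on it into digits+char tokens, expand each token)
-- and replaces A's accumulator loop + branchy formatting by a comprehension; objective: alternative.

-- ===== PORT A =====
-- int(num_str) (both Pythons call it on a nonempty digit string; getD 0 is never reached there)
def pvIntOf (ds : List Char) : Int := (PySem.Int.ofChars? ds).getD 0

-- f"{n:03d}" = str(n).zfill(3) for width 3 (sign stays in front) — exact via PySem.Str.zfill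
def pvFmt03 (n : Int) : String := PySem.Str.zfill (PySem.Int.toStr n) 3

-- A's decode_rle_sequence: outer while over the index, inner while collecting the digit run;
-- ported as structural recursion producing the `result` list of pieces (joined by the caller).
def pvDecodeA : List Char → List (List Char)
  | [] => []
  | c :: rest =>
      if PySem.Chars.isdigit c then
        -- inner while: num_str = c plus the following digits; then one amino acid (if any)
        let ds := c :: rest.takeWhile PySem.Chars.isdigit
        match h : rest.dropWhile PySem.Chars.isdigit with
        | [] => []   -- i reached len(sequence): nothing appended, loop ends
        | a :: rest' => List.replicate (pvIntOf ds).toNat a :: pvDecodeA rest'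
      else [c] :: pvDecodeA rest
  termination_by l => l.length
  decreasing_by
    · have := List.length_dropWhile_le (p := PySem.Chars.isdigit) (l := rest)
      rw [h] at this; simp at this ⊢; omega
    · simp

def search_operation (proteins : List (String × String × String)) (search_sequence : String) (operation_num : Int) : List String :=
  let results := proteins.foldl (fun acc p =>
    let decoded := PySem.Chars.join [] (pvDecodeA p.2.2.toList)
    if PySem.Chars.isIn search_sequence.toList decoded then acc ++ [(p.2.1, p.1)] else acc) []
  let output_lines := [pvFmt03 operation_num ++ " search " ++ search_sequence, "organism protein"]
  if results.isEmpty then output_lines ++ ["NOT FOUND"]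
  else output_lines ++ results.map (fun r => r.1 ++ " " ++ r.2)

-- ===== PORT B =====
-- B's SEP = "\x00"
def pvSep : Char := Char.ofNat 0

-- one char of the marked string: c if digit else c + SEP
def pvMark (c : Char) : List Char := if PySem.Chars.isdigit c then [c] else [c, pvSep]

-- marked = "".join(c if c.isdigit() else c + SEP for c in seq)
def pvMarked (s : List Char) : List Char := PySem.Chars.join [] (s.map pvMark)

-- t[-1] * int(t[:-1]) if len(t) > 1 else t
def pvDecodeTok (t : List Char) : List Char :=
  if 1 < t.length then
    List.replicate (pvIntOf (PySem.List.slice t none (some (-1)))).toNat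
      ((PySem.List.pyGet? t (-1)).getD ' ')
  else t

-- B's decode: marked.split(SEP)[:-1], then expand and join each token
def pvDecodeB (s : List Char) : List Char :=
  PySem.Chars.join []
    ((PySem.List.slice (List.splitOn pvSep (pvMarked s)) none (some (-1))).map pvDecodeTok)

def search_operation_alt (proteins : List (String × String × String)) (search_sequence : String) (operation_num : Int) : List String :=
  let matched := (proteins.filter
      (fun p => PySem.Chars.isIn search_sequence.toList (pvDecodeB p.2.2.toList))).map
      (fun p => p.2.1 ++ " " ++ p.1)
  [pvFmt03 operation_num ++ " search " ++ search_sequence, "organism protein"]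
    ++ (if matched.isEmpty then ["NOT FOUND"] else matched)

-- ===== PRECONDITION & SPEC =====
def Spec_search_operation (proteins : List (String × String × String)) (search_sequence : String) (operation_num : Int) (out : List String) : Prop := out = search_operation_alt proteins search_sequence operation_num
instance (proteins : List (String × String × String)) (search_sequence : String) (operation_num : Int) (out : List String) : Decidable (Spec_search_operation proteins search_sequence operation_num out) := by unfold Spec_search_operation; infer_instance

-- ===== CLAIM (what is proved, stated in full; the proofs are below) =====
def Claim_equal_search_operation : Prop := ∀ (proteins : List (String × String × String)) (search_sequence : String) (operation_num : Int), Dom_search_operation proteins search_sequence operation_num → Spec_search_operation proteins search_sequence operation_num (search_operation proteins search_sequence operation_num)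

-- ===== LEMMAS AND PROOFS =====

-- "".join on List Char pieces is flatten
lemma join_nil_flatten (l : List (List Char)) : PySem.Chars.join [] l = l.flatten := by
  induction l with
  | nil => rfl
  | cons x t ih => cases t <;> simp_all [PySem.Chars.join, List.intercalate, List.intersperse]

lemma slice_neg_one {α : Type} (l : List α) :
    PySem.List.slice l none (some (-1)) = l.dropLast := by
  simp [PySem.List.slice, List.dropLast_eq_take]

lemma pyGet_last (t : List Char) (c : Char) :
    PySem.List.pyGet? (t ++ [c]) (-1) = some c := by
  simp [PySem.List.pyGet?, PySem.List.pyIdx?]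

lemma splitOnP_no_sep (p : Char → Bool) (l : List Char) (h : ∀ x ∈ l, p x = false) :
    List.splitOnP p l = [l] := by
  induction l with
  | nil => simp
  | cons a t ih =>
      rw [List.splitOnP_cons, h a (by simp), ih (fun x hx => h x (by simp [hx]))]
      rfl

lemma splitOnP_append (p : Char → Bool) (q r : List Char) (h : ∀ x ∈ q, p x = false) :
    List.splitOnP p (q ++ r) = List.modifyHead (q ++ ·) (List.splitOnP p r) := by
  induction q with
  | nil =>
      have hid : (fun x : List Char => [] ++ x) = id := by funext x; simp
      rw [List.nil_append, hid, List.modifyHead_id]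
      rfl
  | cons a t ih =>
      rw [List.cons_append, List.splitOnP_cons, h a (by simp),
        ih (fun x hx => h x (by simp [hx])), List.modifyHead_modifyHead]
      rfl

lemma digit_ne_sep {c : Char} (h : PySem.Chars.isdigit c = true) : (c == pvSep) = false := by
  simp only [PySem.Chars.isdigit, Bool.and_eq_true, decide_eq_true_eq] at h
  simp only [beq_eq_false_iff_ne, ne_eq]
  rintro rfl
  exact absurd h.1 (by decide)

-- a trailing all-digit run produces no piece in A's decoder
lemma pvDecodeA_all_digits (l : List Char) (h : ∀ c ∈ l, PySem.Chars.isdigit c) :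
    pvDecodeA l = [] := by
  cases l with
  | nil => simp [pvDecodeA]
  | cons c rest =>
      have hc : PySem.Chars.isdigit c := h c (by simp)
      have hd : rest.dropWhile PySem.Chars.isdigit = [] :=
        List.dropWhile_eq_nil_iff.mpr (fun x hx => h x (by simp [hx]))
      rw [pvDecodeA.eq_def]
      simp only [hc, if_true]
      split
      · rfl
      · rename_i a rest' heq; rw [hd] at heq; cases heq

lemma flatMap_mark_digits (l : List Char) (h : ∀ x ∈ l, PySem.Chars.isdigit x) :
    l.flatMap pvMark = l := by
  induction l with
  | nil => simp
  | cons a t ih =>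
      rw [List.flatMap_cons, ih (fun x hx => h x (by simp [hx]))]
      simp [pvMark, h a (by simp)]

-- unfolding A's decoder at a digit run followed by a character
lemma pvDecodeA_digit_cons (c : Char) (rest : List Char) (hc : PySem.Chars.isdigit c = true)
    (a0 : Char) (rest0 : List Char)
    (hdrop : rest.dropWhile PySem.Chars.isdigit = a0 :: rest0) :
    pvDecodeA (c :: rest)
      = List.replicate (pvIntOf (c :: rest.takeWhile PySem.Chars.isdigit)).toNat a0
          :: pvDecodeA rest0 := by
  rw [pvDecodeA.eq_def]
  simp only [hc, if_true]
  split
  · rename_i heq; rw [hdrop] at heq; cases heq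
  · rename_i a1 rest1 heq; rw [hdrop] at heq; cases heq; rfl

-- the mark/split/expand pipeline produces exactly A's piece list (for NUL-free input)
lemma decodeB_pieces (s : List Char) :
    (∀ c ∈ s, (c == pvSep) = false) →
    (List.splitOn pvSep (pvMarked s)).dropLast.map pvDecodeTok = pvDecodeA s := by
  induction s using pvDecodeA.induct with
  | case1 => intro _; simp [pvMarked, List.splitOn, pvDecodeA]
  | case2 c rest hc hdrop =>
      intro h
      have hall : ∀ x ∈ c :: rest, PySem.Chars.isdigit x := by
        intro x hx
        rcases List.mem_cons.mp hx with rfl | hx'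
        · exact hc
        · have : rest.takeWhile PySem.Chars.isdigit = rest := by
            have := List.takeWhile_append_dropWhile (p := PySem.Chars.isdigit) (l := rest)
            rw [hdrop, List.append_nil] at this; exact this
          rw [← this] at hx'
          exact List.mem_takeWhile_imp hx'
      have hm : pvMarked (c :: rest) = c :: rest := by
        rw [pvMarked, join_nil_flatten, ← List.flatMap_def, flatMap_mark_digits _ hall]
      rw [hm, List.splitOn, splitOnP_no_sep _ _ (fun x hx => digit_ne_sep (hall x hx)),
        pvDecodeA_all_digits _ hall]
      rfl
  | case3 c rest hc a rest' hdrop ih =>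
      intro h
      have hds : rest.takeWhile PySem.Chars.isdigit ++ a :: rest' = rest := by
        have := List.takeWhile_append_dropWhile (p := PySem.Chars.isdigit) (l := rest)
        rw [hdrop] at this; exact this
      have ha : PySem.Chars.isdigit a = false := by
        have hne : rest.dropWhile PySem.Chars.isdigit ≠ [] := by rw [hdrop]; simp
        have h2 := List.head_dropWhile_not PySem.Chars.isdigit hne
        rwa [show (rest.dropWhile PySem.Chars.isdigit).head hne = a from by simp [hdrop]] at h2
      set ds0 := rest.takeWhile PySem.Chars.isdigit with hds0
      have hmem : ∀ x ∈ a :: rest', x ∈ c :: rest := by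
        intro x hx; exact List.mem_cons_of_mem c (hds ▸ List.mem_append_right ds0 hx)
      have hdm : (ds0.map pvMark).flatten = ds0 := by
        rw [← List.flatMap_def]
        exact flatMap_mark_digits _ (fun x hx => List.mem_takeWhile_imp hx)
      -- marked = (c :: ds0 ++ [a]) ++ sep :: marked rest'
      have hm : pvMarked (c :: rest) = ((c :: ds0) ++ [a]) ++ pvSep :: pvMarked rest' := by
        rw [pvMarked, ← hds]
        simp only [List.map_cons, List.map_append, join_nil_flatten, List.flatten_cons,
          List.flatten_append]
        rw [pvMark, if_pos hc, pvMark, if_neg (by simp [ha]), pvMarked, join_nil_flatten]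
        simp [hdm]
      have hq : ∀ x ∈ (c :: ds0) ++ [a], (x == pvSep) = false := by
        intro x hx
        rcases List.mem_append.mp hx with hx' | hx'
        · rcases List.mem_cons.mp hx' with rfl | hx''
          · exact digit_ne_sep hc
          · exact digit_ne_sep (List.mem_takeWhile_imp hx'')
        · have hxa : x = a := by simpa using hx'
          subst hxa
          exact h x (hmem x (by simp))
      rw [hm, List.splitOn, splitOnP_append _ _ _ hq, List.splitOnP_cons]
      simp only [beq_self_eq_true, if_pos]
      rw [List.modifyHead_cons, List.append_nil,
        List.dropLast_cons_of_ne_nil (List.splitOnP_ne_nil _ _), List.map_cons]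
      have htok : pvDecodeTok ((c :: ds0) ++ [a])
          = List.replicate (pvIntOf (c :: ds0)).toNat a := by
        rw [pvDecodeTok, if_pos (by simp), slice_neg_one, List.dropLast_concat, pyGet_last]
        rfl
      rw [htok, ← List.splitOn, ih (fun x hx => h x (hmem x (by simp [hx]))),
        pvDecodeA_digit_cons c rest hc a rest' hdrop]
  | case4 c rest hc ih =>
      intro h
      have hm : pvMarked (c :: rest) = c :: pvSep :: pvMarked rest := by
        rw [pvMarked, List.map_cons, join_nil_flatten, List.flatten_cons, pvMark,
          if_neg hc, pvMarked, join_nil_flatten]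
        rfl
      rw [hm, List.splitOn, List.splitOnP_cons, if_neg (by simp [h c (by simp)]),
        List.splitOnP_cons]
      simp only [beq_self_eq_true, if_pos]
      rw [List.modifyHead_cons,
        List.dropLast_cons_of_ne_nil (List.splitOnP_ne_nil _ _), List.map_cons]
      have htok : pvDecodeTok [c] = [c] := by rw [pvDecodeTok, if_neg (by simp)]
      rw [htok, ← List.splitOn, ih (fun x hx => h x (by simp [hx]))]
      conv_rhs => rw [pvDecodeA.eq_def]
      simp [hc]

lemma dom_ne_sep {c : Char} (h : pvDomChar c = true) : (c == pvSep) = false := by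
  simp only [pvDomChar, Bool.or_eq_true, Bool.and_eq_true, decide_eq_true_eq,
    beq_iff_eq] at h
  simp only [beq_eq_false_iff_ne, ne_eq]
  rintro rfl
  simp [pvSep] at h

-- on NUL-free input B's decoder returns the join of A's pieces
lemma decodeB_eq (s : List Char) (h : ∀ c ∈ s, pvDomChar c = true) :
    pvDecodeB s = PySem.Chars.join [] (pvDecodeA s) := by
  rw [pvDecodeB, slice_neg_one, decodeB_pieces s (fun c hc => dom_ne_sep (h c hc))]

-- ===== VERDICT (by name: the statement is the Claim_ definition above) =====

theorem search_operation_spec : Claim_equal_search_operation := by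
  intro proteins search_sequence operation_num hdom
  unfold Spec_search_operation search_operation search_operation_alt
  have hall : ∀ p ∈ proteins, ∀ c ∈ p.2.2.toList, pvDomChar c = true := by
    unfold Dom_search_operation at hdom
    simp only [Bool.and_eq_true, List.all_eq_true] at hdom
    intro p hp c hc
    have := (hdom.1.1 p hp)
    have := this.2.2
    rw [pvDomStr, List.all_eq_true] at this
    exact this c hc
  have hfe : proteins.filter
      (fun p => PySem.Chars.isIn search_sequence.toList (pvDecodeB p.2.2.toList))
      = proteins.filter
      (fun p => PySem.Chars.isIn search_sequence.toList
        (PySem.Chars.join [] (pvDecodeA p.2.2.toList))) := by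
    apply List.filter_congr
    intro p hp
    rw [decodeB_eq _ (hall p hp)]
  simp only [hfe]
  rw [PySem.List.foldl_append_if]
  simp only [List.nil_append, List.map_map]
  set P := fun p : String × String × String =>
    PySem.Chars.isIn search_sequence.toList (PySem.Chars.join [] (pvDecodeA p.2.2.toList)) with hP
  rcases h : (proteins.filter P) with _ | _ <;> simp [Function.comp]
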